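-- pv_equiv track=rewrite | github.com/classifyre-com/classifyre | apps/cli/src/pipeline/detector_pipeline.py | _supports_content_type
-- ===== SOURCE A (Python) =====
-- def _supports_content_type(supported: list[str], content_type: str) -> bool:
--     """
--     Check MIME compatibility, including wildcard and text fallback behavior.
--     """
--     if content_type in supported:
--         return True
--
--     for supported_type in supported:
--         if supported_type.endswith("/*"):
--             prefix = supported_type[:-1]
--             if content_type.startswith(prefix):
--                 return True
--
--     # Compatibility fallback: text detectors that declare text/plain
--     # should still process extracted HTML text content.
--     if content_type == "text/html" and "text/plain" in supported:
--         return True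
--
--     return False
-- ===== SOURCE B (Python) =====
-- def _supports_content_type(supported: list[str], content_type: str) -> bool:
--     """Derive the finite set of patterns that accept content_type, then test each
--     supported entry for membership in that set (no per-entry string matching)."""
--     candidates = {content_type}
--     for i, ch in enumerate(content_type):
--         if ch == "/":
--             candidates.add(content_type[: i + 1] + "*")
--     if content_type == "text/html":
--         candidates.add("text/plain")
--     return any(entry in candidates for entry in supported)
-- ===== Notes on version B (the rewrite author's own statement) =====
-- stated objective: alternative
-- what changed: Instead of scanning each supported entry with endswith/startswith wildcard tests, B precomputes from content_type the finite set of patterns that would accept it (the type itself, one 'prefix-up-to-each-slash + *' pattern per slash, and text/plain when content_type is text/html) and then just tests each supported entry for set membership.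
import Mathlib
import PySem

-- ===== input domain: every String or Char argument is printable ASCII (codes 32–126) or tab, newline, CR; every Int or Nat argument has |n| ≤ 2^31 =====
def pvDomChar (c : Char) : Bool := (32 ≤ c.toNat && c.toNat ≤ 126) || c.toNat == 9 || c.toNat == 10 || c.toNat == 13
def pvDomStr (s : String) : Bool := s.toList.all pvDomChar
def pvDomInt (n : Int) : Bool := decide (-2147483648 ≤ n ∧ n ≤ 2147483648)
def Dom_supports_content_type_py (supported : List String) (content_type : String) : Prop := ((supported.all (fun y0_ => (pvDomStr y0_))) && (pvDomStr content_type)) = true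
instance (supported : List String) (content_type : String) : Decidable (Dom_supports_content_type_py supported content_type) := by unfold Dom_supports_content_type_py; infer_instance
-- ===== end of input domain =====

-- B derives from content_type the finite set of patterns that accept it and tests each supported
-- entry for membership, instead of A's per-entry endswith/startswith matching; objective: alternative.

-- ===== PORT A =====
def supports_content_type_py (supported : List String) (content_type : String) : Bool :=
  if supported.contains content_type then true
  else if supported.any (fun supported_type =>
      PySem.Str.endswith supported_type "/*" &&
      PySem.Str.startswith content_type (PySem.Str.slice supported_type none (some (-1)))) then true
  else if content_type == "text/html" && supported.contains "text/plain" then true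
  else false

-- ===== PORT B =====
-- candidates after B's for-loop: {content_type} plus content_type[:i+1]+"*" for each '/' at index i
-- (Python's string concatenation content_type[:i+1] + "*" is ported exactly as append on toList).
def sctCandidates (content_type : String) : PySem.Set String :=
  (PySem.List.enumerate content_type.toList 0).foldl
    (fun s p => if p.2 == '/' then
        PySem.Set.add s (String.ofList ((PySem.Str.slice content_type none (some (p.1 + 1))).toList ++ ['*']))
      else s)
    (PySem.Set.ofList [content_type])

def supports_content_type_py_alt (supported : List String) (content_type : String) : Bool :=
  let cands :=
    if content_type == "text/html" then PySem.Set.add (sctCandidates content_type) "text/plain"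
    else sctCandidates content_type
  supported.any (fun entry => PySem.Set.contains cands entry)

-- ===== PRECONDITION & SPEC =====
def Spec_supports_content_type_py (supported : List String) (content_type : String) (out : Bool) : Prop := out = supports_content_type_py_alt supported content_type
instance (supported : List String) (content_type : String) (out : Bool) : Decidable (Spec_supports_content_type_py supported content_type out) := by unfold Spec_supports_content_type_py; infer_instance

-- ===== CLAIM (what is proved, stated in full; the proofs are below) =====
def Claim_equal_supports_content_type_py : Prop := ∀ (supported : List String) (content_type : String), Dom_supports_content_type_py supported content_type → Spec_supports_content_type_py supported content_type (supports_content_type_py supported content_type)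

-- ===== LEMMAS AND PROOFS =====

-- membership in a foldl of conditional Set.adds
lemma mem_foldl_add {α β : Type} [BEq α] [LawfulBEq α]
    (l : List β) (c : β → Bool) (f : β → α) (s0 : PySem.Set α) (x : α) :
    (x ∈ l.foldl (fun s p => if c p then PySem.Set.add s (f p) else s) s0) ↔
      x ∈ s0 ∨ ∃ p ∈ l, c p = true ∧ x = f p := by
  induction l generalizing s0 with
  | nil => simp
  | cons p rest ih =>
    simp only [List.foldl_cons]
    by_cases hc : c p = true
    · rw [hc, if_pos rfl, ih, PySem.Set.mem_add]
      constructor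
      · rintro (⟨h | h⟩ | ⟨q, hq, hcq, hx⟩)
        · exact Or.inl h
        · exact Or.inr ⟨p, by simp, hc, h⟩
        · exact Or.inr ⟨q, by simp [hq], hcq, hx⟩
      · rintro (h | ⟨q, hq, hcq, hx⟩)
        · exact Or.inl (Or.inl h)
        · rcases List.mem_cons.mp hq with rfl | hq'
          · exact Or.inl (Or.inr hx)
          · exact Or.inr ⟨q, hq', hcq, hx⟩
    · rw [if_neg hc, ih]
      constructor
      · rintro (h | ⟨q, hq, hcq, hx⟩)
        · exact Or.inl h
        · exact Or.inr ⟨q, by simp [hq], hcq, hx⟩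
      · rintro (h | ⟨q, hq, hcq, hx⟩)
        · exact Or.inl h
        · rcases List.mem_cons.mp hq with rfl | hq'
          · exact absurd hcq hc
          · exact Or.inr ⟨q, hq', hcq, hx⟩

-- A's wildcard test, written on the underlying character lists
lemma wc_iff0 (ct e : String) :
    (PySem.Str.endswith e "/*" &&
      PySem.Str.startswith ct (PySem.Str.slice e none (some (-1)))) = true ↔
      (['/', '*'] <:+ e.toList ∧ e.toList.dropLast <+: ct.toList) := by
  have h1 : PySem.Chars.slice e.toList none (some (-1)) = e.toList.dropLast :=
    PySem.List.slice_to_neg_one e.toList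
  have h2 : ("/*" : String).toList = ['/', '*'] := by decide
  simp only [Bool.and_eq_true, PySem.Str.endswith_eq, PySem.Str.startswith_eq,
    PySem.Str.toList_slice, PySem.Chars.endswith_iff, PySem.Chars.startswith_iff, h1, h2]

-- the entries A's wildcard loop accepts are exactly B's per-slash candidates
lemma wc_iff (ct e : String) :
    (PySem.Str.endswith e "/*" &&
      PySem.Str.startswith ct (PySem.Str.slice e none (some (-1)))) = true ↔
      ∃ k : Nat, ∃ hk : k < ct.toList.length, ct.toList[k] = '/' ∧
        e.toList = ct.toList.take (k + 1) ++ ['*'] := by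
  rw [wc_iff0]
  constructor
  · rintro ⟨⟨q, hq⟩, hpre⟩
    have hdl : e.toList.dropLast = q ++ ['/'] := by
      rw [← hq]; simp
    rw [hdl] at hpre
    obtain ⟨t, ht⟩ := hpre
    have hlen : q.length + 1 ≤ ct.toList.length := by
      have := congrArg List.length ht
      simp only [List.length_append, List.length_cons, List.length_nil] at this
      omega
    refine ⟨q.length, by omega, ?_, ?_⟩
    · have hopt : ct.toList[q.length]? = some '/' := by
        rw [← ht]; simp
      rw [List.getElem?_eq_getElem (by omega)] at hopt
      exact Option.some.inj hopt
    · have htake : ct.toList.take (q.length + 1) = q ++ ['/'] := by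
        rw [← ht]
        rw [List.take_append_of_le_length (by simp)]
        simp
      rw [htake, ← hq]; simp
  · rintro ⟨k, hk, hget, he⟩
    have htk : ct.toList.take (k + 1) = ct.toList.take k ++ [ct.toList[k]] := by
      rw [List.take_add_one]; simp [List.getElem?_eq_getElem hk]
    constructor
    · refine ⟨ct.toList.take k, ?_⟩
      rw [he, htk, hget]; simp
    · have : e.toList.dropLast = ct.toList.take (k + 1) := by
        rw [he]; simp
      rw [this]; exact List.take_prefix _ _

lemma mem_sctCandidates (ct e : String) :
    e ∈ sctCandidates ct ↔
      e = ct ∨ (PySem.Str.endswith e "/*" &&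
        PySem.Str.startswith ct (PySem.Str.slice e none (some (-1)))) = true := by
  rw [sctCandidates, mem_foldl_add, wc_iff]
  rw [PySem.Set.mem_ofList]
  simp only [List.mem_singleton]
  apply or_congr Iff.rfl
  constructor
  · rintro ⟨p, hp, hc, he⟩
    obtain ⟨k, hk, rfl⟩ := ((PySem.List.mem_enumerate_iff _ _ _).mp hp)
    refine ⟨k, hk, by simpa using hc, ?_⟩
    rw [he]
    simp only [String.toList_ofList]
    simp
    rw [show ((k:Int) + 1) = ((k+1 : Nat) : Int) by push_cast; ring]
    exact PySem.List.slice_to_natCast ct.toList (k+1)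
  · rintro ⟨k, hk, hget, he⟩
    refine ⟨((0:Int) + k, ct.toList[k]), ((PySem.List.mem_enumerate_iff _ _ _).mpr ⟨k, hk, rfl⟩), by simp [hget], ?_⟩
    have hsl : (PySem.Str.slice ct none (some ((0 + (k:Int)) + 1))).toList = ct.toList.take (k+1) := by
      rw [PySem.Str.toList_slice]
      have : ((0 + (k:Int)) + 1) = ((k+1 : Nat) : Int) := by push_cast; ring
      rw [this]
      exact PySem.List.slice_to_natCast ct.toList (k+1)
    show e = String.ofList ((PySem.Str.slice ct none (some ((0 + (k:Int)) + 1))).toList ++ ['*'])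
    rw [hsl, ← he]
    simp

lemma mem_cands (ct e : String) :
    (e ∈ (if ct = "text/html" then PySem.Set.add (sctCandidates ct) "text/plain" else sctCandidates ct)) ↔
      (e = ct ∨ (PySem.Str.endswith e "/*" &&
        PySem.Str.startswith ct (PySem.Str.slice e none (some (-1)))) = true ∨
        (ct = "text/html" ∧ e = "text/plain")) := by
  split_ifs with h
  · rw [PySem.Set.mem_add, mem_sctCandidates]
    simp [h]
    tauto
  · rw [mem_sctCandidates]
    simp [h]

-- ===== VERDICT (by name: the statement is the Claim_ definition above) =====
theorem supports_content_type_py_spec : Claim_equal_supports_content_type_py := by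
  intro supported ct _
  unfold Spec_supports_content_type_py
  have hA : supports_content_type_py supported ct =
      (supported.contains ct ||
       supported.any (fun e => PySem.Str.endswith e "/*" &&
         PySem.Str.startswith ct (PySem.Str.slice e none (some (-1)))) ||
       (ct == "text/html" && supported.contains "text/plain")) := by
    unfold supports_content_type_py
    cases hc : supported.contains ct <;>
    cases ha : supported.any (fun e => PySem.Str.endswith e "/*" &&
         PySem.Str.startswith ct (PySem.Str.slice e none (some (-1)))) <;>
    cases hf : (ct == "text/html" && supported.contains "text/plain") <;> simp
  rw [hA]
  unfold supports_content_type_py_alt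
  rw [Bool.eq_iff_iff]
  simp only [List.any_eq_true, PySem.Set.contains_iff, mem_cands, Bool.or_eq_true,
    Bool.and_eq_true, List.contains_eq_mem, beq_iff_eq, decide_eq_true_eq]
  constructor
  · rintro ((h | ⟨e, he, hwc⟩) | ⟨hct, hpl⟩)
    · exact ⟨ct, h, Or.inl rfl⟩
    · exact ⟨e, he, Or.inr (Or.inl hwc)⟩
    · exact ⟨"text/plain", hpl, Or.inr (Or.inr ⟨hct, rfl⟩)⟩
  · rintro ⟨e, he, rfl | hwc | ⟨hct, rfl⟩⟩
    · exact Or.inl (Or.inl he)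
    · exact Or.inl (Or.inr ⟨e, he, hwc⟩)
    · exact Or.inr ⟨hct, he⟩
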